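-- pv_equiv track=rewrite | github.com/symprofold/SymProFold_code | bib/bibpdb.py | trim_pdb
-- ===== SOURCE A (Python) =====
-- def trim_pdb(c, stop_at_TER):
--     '''
--     Trim pdb file.
--     E.g. Leave only 'ATOM' entries, remove 'TER'
--     '''
--     r = []
--
--     for i, l in enumerate(c):
--         if len(l) > 10 and l[0:4] == 'ATOM':
--             r.append(l)
--         if l[0:3] == 'TER' and stop_at_TER == True:
--             break
--
--     return r
-- ===== SOURCE B (Python) =====
-- def trim_pdb(c, stop_at_TER):
--     '''Truncate-then-filter: cut the list at the first TER line (if asked), then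
--     keep the ATOM lines with a single comprehension.'''
--     work = c
--     if stop_at_TER == True:
--         for i, l in enumerate(c):
--             if l[0:3] == 'TER':
--                 work = c[:i]
--                 break
--     return [l for l in work if len(l) > 10 and l[0:4] == 'ATOM']
-- ===== Notes on version B (the rewrite author's own statement) =====
-- stated objective: simpler
-- what changed: Replaces the single interleaved append/break loop by a two-phase truncate-then-filter: first cut the list at the first TER line (only when stop_at_TER == True), then a plain comprehension keeps the ATOM lines.
import Mathlib
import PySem

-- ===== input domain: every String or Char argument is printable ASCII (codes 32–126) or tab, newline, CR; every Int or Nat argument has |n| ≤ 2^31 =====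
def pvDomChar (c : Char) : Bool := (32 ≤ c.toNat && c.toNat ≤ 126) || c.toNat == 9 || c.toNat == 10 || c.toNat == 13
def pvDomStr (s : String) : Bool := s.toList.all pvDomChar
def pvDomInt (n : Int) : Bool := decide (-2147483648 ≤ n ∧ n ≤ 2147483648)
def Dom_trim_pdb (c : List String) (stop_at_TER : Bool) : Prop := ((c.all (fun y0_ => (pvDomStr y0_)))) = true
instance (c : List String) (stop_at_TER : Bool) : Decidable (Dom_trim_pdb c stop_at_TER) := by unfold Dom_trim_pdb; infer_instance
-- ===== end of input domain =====

-- B replaces A's interleaved append/break loop by truncate-at-first-TER then a single filter (objective: simpler).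

-- ===== PORT A =====
-- the for-loop with its accumulator r and the break on TER
def trimGoA : List String → Bool → List String → List String
  | [], _, r => r
  | l :: rest, b, r =>
    let r' := if PySem.Str.len l > 10 && (PySem.Str.slice l (some 0) (some 4) == "ATOM") then r ++ [l] else r
    if (PySem.Str.slice l (some 0) (some 3) == "TER") && (b == true) then r'
    else trimGoA rest b r'

def trim_pdb (c : List String) (stop_at_TER : Bool) : List String :=
  trimGoA c stop_at_TER []

-- ===== PORT B =====
-- the search loop of Source B: first index i with l[0:3] == 'TER'
def terFind : List String → Nat → Option Nat
  | [], _ => none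
  | l :: rest, i =>
    if PySem.Str.slice l (some 0) (some 3) == "TER" then some i else terFind rest (i + 1)

def trim_pdb_alt (c : List String) (stop_at_TER : Bool) : List String :=
  let work :=
    if stop_at_TER == true then
      match terFind c 0 with
      | some i => PySem.List.slice c none (some (i : Int))   -- c[:i]
      | none => c
    else c
  work.filter (fun l => PySem.Str.len l > 10 && (PySem.Str.slice l (some 0) (some 4) == "ATOM"))

-- ===== PRECONDITION & SPEC =====
def Spec_trim_pdb (c : List String) (stop_at_TER : Bool) (out : List String) : Prop := out = trim_pdb_alt c stop_at_TER
instance (c : List String) (stop_at_TER : Bool) (out : List String) : Decidable (Spec_trim_pdb c stop_at_TER out) := by unfold Spec_trim_pdb; infer_instance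

-- ===== CLAIM (what is proved, stated in full; the proofs are below) =====
def Claim_equal_trim_pdb : Prop := ∀ (c : List String) (stop_at_TER : Bool), Dom_trim_pdb c stop_at_TER → Spec_trim_pdb c stop_at_TER (trim_pdb c stop_at_TER)

-- ===== LEMMAS AND PROOFS =====

def atomP (l : String) : Bool := PySem.Str.len l > 10 && (PySem.Str.slice l (some 0) (some 4) == "ATOM")
def terP (l : String) : Bool := PySem.Str.slice l (some 0) (some 3) == "TER"

-- a TER line is never an ATOM line
theorem terP_not_atomP (l : String) (h : terP l = true) : atomP l = false := by
  unfold terP at h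
  unfold atomP
  by_cases h4 : PySem.Str.slice l (some 0) (some 4) == "ATOM"
  · exfalso
    have e3 : PySem.Str.slice l (some 0) (some 3) = "TER" := eq_of_beq h
    have e4 : PySem.Str.slice l (some 0) (some 4) = "ATOM" := eq_of_beq h4
    have t3 : (PySem.Str.slice l (some 0) (some 3)).toList = l.toList.take 3 := by
      simp [PySem.Str.toList_slice, PySem.List.slice_zero_start, PySem.List.slice_to]
    have t4 : (PySem.Str.slice l (some 0) (some 4)).toList = l.toList.take 4 := by
      simp [PySem.Str.toList_slice, PySem.List.slice_zero_start, PySem.List.slice_to]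
    rw [e3] at t3; rw [e4] at t4
    have key : List.take 3 l.toList = List.take 3 (List.take 4 l.toList) := by
      rw [List.take_take]; norm_num
    rw [← t4, ← t3] at key
    exact absurd key (by decide)
  · simp [h4]

theorem terFind_succ (c : List String) (i : Nat) :
    terFind c (i + 1) = (terFind c i).map (· + 1) := by
  induction c generalizing i with
  | nil => simp [terFind]
  | cons l rest ih =>
    simp only [terFind]
    by_cases h : PySem.Str.slice l (some 0) (some 3) == "TER"
    · simp [h]
    · simp [h, ih]

theorem work_eq_takeWhile (c : List String) :
    (match terFind c 0 with
     | some i => PySem.List.slice c none (some (i : Int))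
     | none => c) = c.takeWhile (fun l => !terP l) := by
  induction c with
  | nil => simp [terFind]
  | cons l rest ih =>
    simp only [terFind, List.takeWhile_cons]
    by_cases h : PySem.Str.slice l (some 0) (some 3) == "TER"
    · simp [h, terP, PySem.List.slice_to]
    · have hterP : terP l = false := by simp [terP, h]
      simp only [h, if_neg, Bool.false_eq_true, not_false_eq_true, hterP, Bool.not_false, if_true]
      rw [show (1 : Nat) = 0 + 1 by rfl, terFind_succ]
      cases hf : terFind rest 0 with
      | none => simp [hf] at ih ⊢; exact ih
      | some j =>
        simp only [hf, Option.map_some] at ih ⊢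
        have hsl : PySem.List.slice (l :: rest) none (some ((j + 1 : Nat) : Int)) =
            l :: PySem.List.slice rest none (some ((j : Nat) : Int)) := by
          rw [PySem.List.slice_to_natCast, PySem.List.slice_to_natCast]
          simp [List.take_succ_cons]
        rw [hsl, ih]

theorem alt_eq (c : List String) (b : Bool) :
    trim_pdb_alt c b = (if b then c.takeWhile (fun l => !terP l) else c).filter atomP := by
  unfold trim_pdb_alt
  cases b with
  | false => rfl
  | true => simp only [beq_self_eq_true, if_pos, work_eq_takeWhile]; rfl

theorem trimGoA_eq (c : List String) (b : Bool) (r : List String) :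
    trimGoA c b r = r ++ trim_pdb_alt c b := by
  induction c generalizing r with
  | nil => simp [trimGoA, alt_eq]
  | cons l rest ih =>
    rw [alt_eq]
    simp only [trimGoA]
    have hA : (decide (PySem.Str.len l > 10) && (PySem.Str.slice l (some 0) (some 4) == "ATOM")) = atomP l := rfl
    have hT : (PySem.Str.slice l (some 0) (some 3) == "TER") = terP l := rfl
    rw [hA, hT]
    cases b with
    | false =>
      simp only [show (false == true) = false from rfl, Bool.and_false, Bool.false_eq_true, if_neg, not_false_eq_true]
      rw [ih, alt_eq]
      cases hA2 : atomP l <;> simp [hA2]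
    | true =>
      simp only [beq_self_eq_true, Bool.and_true, List.takeWhile_cons]
      cases hT2 : terP l with
      | true =>
        have hA2 := terP_not_atomP l hT2
        simp [hA2]
      | false =>
        simp only [Bool.false_eq_true, if_neg, not_false_eq_true, Bool.not_false, if_true]
        rw [ih, alt_eq]
        simp only [if_pos]
        cases hA2 : atomP l <;> simp [hA2]

-- ===== VERDICT (by name: the statement is the Claim_ definition above) =====
theorem trim_pdb_spec : Claim_equal_trim_pdb := by
  intro c b _
  unfold Spec_trim_pdb trim_pdb
  rw [trimGoA_eq]
  simp
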